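-- pv_equiv track=rewrite | github.com/ksanchez-jpg/planificador-turnos | app.py | _max_cons_con_previos
-- ===== SOURCE A (Python) =====
-- def _max_cons_con_previos(semana: list, cons_previos: int) -> int:
--     """Calcula la racha máxima contando los consecutivos que vienen de antes."""
--     max_r = 0
--     racha = cons_previos
--     for v in semana:
--         if v:
--             racha += 1
--             max_r = max(max_r, racha)
--         else:
--             racha = 0
--     return max_r
-- ===== SOURCE B (Python) =====
-- def _max_cons_con_previos(semana: list, cons_previos: int) -> int:
--     """Group-then-reduce: scan maximal truthy runs; a run starting at index 0
--     gets the cons_previos bonus; return the largest effective run (at least 0)."""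
--     best = 0
--     n = len(semana)
--     i = 0
--     while i < n:
--         if semana[i]:
--             j = i
--             while j < n and semana[j]:
--                 j += 1
--             best = max(best, j - i + (cons_previos if i == 0 else 0))
--             i = j
--         else:
--             i += 1
--     return best
-- ===== Notes on version B (the rewrite author's own statement) =====
-- stated objective: alternative
-- what changed: Replaces A's element-wise accumulator (racha/max_r updated per element) with a group-then-reduce scan over maximal truthy runs: each run's length is taken whole, with the cons_previos bonus added only to a run starting at index 0.
import Mathlib
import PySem

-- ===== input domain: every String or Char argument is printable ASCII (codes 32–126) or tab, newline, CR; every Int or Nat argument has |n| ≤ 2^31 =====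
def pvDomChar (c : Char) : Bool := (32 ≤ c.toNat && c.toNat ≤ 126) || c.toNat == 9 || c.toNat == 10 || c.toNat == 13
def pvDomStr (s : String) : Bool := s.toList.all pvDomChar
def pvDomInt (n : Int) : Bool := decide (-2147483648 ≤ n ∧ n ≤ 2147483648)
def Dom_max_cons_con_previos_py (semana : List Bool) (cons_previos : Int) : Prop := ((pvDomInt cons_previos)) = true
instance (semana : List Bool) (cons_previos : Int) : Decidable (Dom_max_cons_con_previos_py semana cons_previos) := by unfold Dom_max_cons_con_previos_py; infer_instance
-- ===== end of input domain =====

-- B re-implements A as a group-then-reduce over maximal truthy runs (alternative decomposition, same O(n) cost).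

-- ===== PORT A =====
-- element-wise fold carrying (max_r, racha), literally A's loop
def max_cons_con_previos_py (semana : List Bool) (cons_previos : Int) : Int :=
  (semana.foldl
    (fun (st : Int × Int) v => if v then (max st.1 (st.2 + 1), st.2 + 1) else (st.1, 0))
    (0, cons_previos)).1

-- ===== PORT B =====
-- inner while loop of B: length of the leading truthy run of `xs` plus 1 (the true already seen), and the rest
def pvTakeTrue : List Bool → Nat × List Bool
  | [] => (0, [])
  | true :: xs => ((pvTakeTrue xs).1 + 1, (pvTakeTrue xs).2)
  | false :: xs => (0, false :: xs)

theorem pvTakeTrue_len : ∀ (l : List Bool), (pvTakeTrue l).2.length ≤ l.length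
  | [] => by simp [pvTakeTrue]
  | true :: xs => by simpa [pvTakeTrue] using Nat.le_succ_of_le (pvTakeTrue_len xs)
  | false :: xs => by simp [pvTakeTrue]

-- outer while loop of B: `atStart` is `i == 0` (run starts at index 0)
def pvAltGo : List Bool → Bool → Int → Int
  | [], _, _ => 0
  | false :: xs, _, cp => pvAltGo xs false cp
  | true :: xs, atStart, cp =>
      max ((((pvTakeTrue xs).1 + 1 : Nat) : Int) + (if atStart then cp else 0))
          (pvAltGo (pvTakeTrue xs).2 false cp)
termination_by l => l.length
decreasing_by
  all_goals simp only [List.length_cons]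
  · omega
  · exact Nat.lt_succ_of_le (pvTakeTrue_len xs)

def max_cons_con_previos_py_alt (semana : List Bool) (cons_previos : Int) : Int :=
  pvAltGo semana true cons_previos

-- ===== PRECONDITION & SPEC =====
def Spec_max_cons_con_previos_py (semana : List Bool) (cons_previos : Int) (out : Int) : Prop := out = max_cons_con_previos_py_alt semana cons_previos
instance (semana : List Bool) (cons_previos : Int) (out : Int) : Decidable (Spec_max_cons_con_previos_py semana cons_previos out) := by unfold Spec_max_cons_con_previos_py; infer_instance

-- ===== CLAIM (what is proved, stated in full; the proofs are below) =====
def Claim_equal_max_cons_con_previos_py : Prop := ∀ (semana : List Bool) (cons_previos : Int), Dom_max_cons_con_previos_py semana cons_previos → Spec_max_cons_con_previos_py semana cons_previos (max_cons_con_previos_py semana cons_previos)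

-- ===== LEMMAS AND PROOFS =====

-- abbreviation for A's fold from an arbitrary state
def pvAf (l : List Bool) (st : Int × Int) : Int × Int :=
  l.foldl (fun (st : Int × Int) v => if v then (max st.1 (st.2 + 1), st.2 + 1) else (st.1, 0)) st

theorem pvAf_nil (st : Int × Int) : pvAf [] st = st := rfl

theorem pvAf_cons_true (xs : List Bool) (st : Int × Int) :
    pvAf (true :: xs) st = pvAf xs (max st.1 (st.2 + 1), st.2 + 1) := rfl

theorem pvAf_cons_false (xs : List Bool) (st : Int × Int) :
    pvAf (false :: xs) st = pvAf xs (st.1, 0) := rfl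

theorem pvAltGo_nil (b : Bool) (cp : Int) : pvAltGo [] b cp = 0 := by rw [pvAltGo]

theorem pvAltGo_false (xs : List Bool) (b : Bool) (cp : Int) :
    pvAltGo (false :: xs) b cp = pvAltGo xs false cp := by rw [pvAltGo]

theorem pvAltGo_true (xs : List Bool) (b : Bool) (cp : Int) :
    pvAltGo (true :: xs) b cp =
      max ((((pvTakeTrue xs).1 + 1 : Nat) : Int) + (if b then cp else 0))
          (pvAltGo (pvTakeTrue xs).2 false cp) := by rw [pvAltGo]

-- the rest returned by pvTakeTrue is empty or starts with false
theorem pvTakeTrue_rest : ∀ (l : List Bool),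
    (pvTakeTrue l).2 = [] ∨ ∃ r, (pvTakeTrue l).2 = false :: r
  | [] => Or.inl rfl
  | true :: xs => by simpa [pvTakeTrue] using pvTakeTrue_rest xs
  | false :: xs => Or.inr ⟨xs, rfl⟩

-- processing a whole truthy run at once: the running max over an increasing racha is its last value
theorem pvAf_run : ∀ (xs : List Bool) (m r : Int),
    pvAf (true :: xs) (m, r) =
      pvAf (pvTakeTrue xs).2 (max m (r + ((pvTakeTrue xs).1 + 1)), r + ((pvTakeTrue xs).1 + 1))
  | [], m, r => by simp [pvAf_cons_true, pvTakeTrue]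
  | true :: ys, m, r => by
      rw [pvAf_cons_true, pvAf_run ys (max m (r + 1)) (r + 1)]
      simp only [pvTakeTrue]
      congr 1
      rw [Prod.mk.injEq]
      refine ⟨?_, ?_⟩ <;> (push_cast; omega)
  | false :: ys, m, r => by
      simp [pvAf_cons_true, pvTakeTrue]

theorem pvAltGo_nonneg : ∀ (n : Nat) (l : List Bool), l.length ≤ n →
    ∀ (cp : Int), 0 ≤ pvAltGo l false cp := by
  intro n
  induction n with
  | zero => intro l hl cp; simp at hl; subst hl; simp [pvAltGo_nil]
  | succ n ih =>
      intro l hl cp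
      match l with
      | [] => simp [pvAltGo_nil]
      | false :: xs =>
          rw [pvAltGo_false]
          exact ih xs (by simpa using Nat.le_of_succ_le_succ hl) cp
      | true :: xs =>
          rw [pvAltGo_true]
          refine le_max_of_le_left ?_
          simp only [Bool.false_eq_true, if_false]
          positivity

-- main invariant: from state (m, 0) with 0 ≤ m, A's fold yields max m (B's scan away from the start)
theorem pvAf_altGo : ∀ (n : Nat) (l : List Bool), l.length ≤ n →
    ∀ (m cp : Int), 0 ≤ m → (pvAf l (m, 0)).1 = max m (pvAltGo l false cp) := by
  intro n
  induction n with
  | zero =>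
      intro l hl m cp hm; simp at hl; subst hl; simp [pvAf_nil, pvAltGo_nil]; omega
  | succ n ih =>
      intro l hl m cp hm
      match l with
      | [] => simp [pvAf_nil, pvAltGo_nil]; omega
      | false :: xs =>
          rw [pvAf_cons_false, pvAltGo_false,
            ih xs (by simpa using Nat.le_of_succ_le_succ hl) m cp hm]
      | true :: xs =>
          rw [pvAf_run xs m 0, pvAltGo_true]
          rcases pvTakeTrue_rest xs with hrest | ⟨r, hrest⟩
          · rw [hrest, pvAf_nil, pvAltGo_nil]
            simp only [Bool.false_eq_true, if_false]
            push_cast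
            omega
          · have hlen : r.length ≤ n := by
              have h1 := pvTakeTrue_len xs
              rw [hrest] at h1
              simp at h1 hl
              omega
            rw [hrest, pvAf_cons_false,
              ih r hlen _ cp (le_trans hm (le_max_left _ _)), pvAltGo_false]
            have := pvAltGo_nonneg r.length r le_rfl cp
            simp only [Bool.false_eq_true, if_false]
            push_cast
            omega

-- ===== VERDICT (by name: the statement is the Claim_ definition above) =====
theorem max_cons_con_previos_py_spec : Claim_equal_max_cons_con_previos_py := by
  intro semana cp _
  show max_cons_con_previos_py semana cp = max_cons_con_previos_py_alt semana cp
  unfold max_cons_con_previos_py max_cons_con_previos_py_alt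
  match semana with
  | [] => rw [show (([] : List Bool).foldl _ ((0 : Int), cp)) = pvAf [] (0, cp) from rfl,
        pvAf_nil, pvAltGo_nil]
  | false :: xs =>
      show (pvAf (false :: xs) (0, cp)).1 = pvAltGo (false :: xs) true cp
      rw [pvAf_cons_false, pvAltGo_false,
        pvAf_altGo xs.length xs le_rfl 0 cp le_rfl]
      have := pvAltGo_nonneg xs.length xs le_rfl cp
      omega
  | true :: xs =>
      show (pvAf (true :: xs) (0, cp)).1 = pvAltGo (true :: xs) true cp
      rw [pvAf_run xs 0 cp, pvAltGo_true]
      rcases pvTakeTrue_rest xs with hrest | ⟨r, hrest⟩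
      · rw [hrest, pvAf_nil, pvAltGo_nil]
        simp only [if_pos rfl]
        push_cast
        omega
      · rw [hrest, pvAf_cons_false,
          pvAf_altGo r.length r le_rfl _ cp (le_max_left _ _), pvAltGo_false]
        have := pvAltGo_nonneg r.length r le_rfl cp
        simp only [if_pos rfl]
        push_cast
        omega
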